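-- pv_equiv track=rewrite | github.com/RIshimoto/AtCoder_myPractice | ABC/ABC255/random_checker.py | solve_Jury
-- ===== SOURCE A (Python) =====
-- def solve_Jury(N, M, S, X):
--     mx = 0
--     for a in range(-100, 100):
--         b = a
--         cnt = 0
--         for s in S:
--             cnt += X.count(b)
--             b = s - b
--         cnt += X.count(b)
--         if mx < cnt:
--             a_mx = a
--         mx = max(mx, cnt)
--     return mx, a_mx
-- ===== SOURCE B (Python) =====
-- def solve_Jury(N, M, S, X):
--     # Partial alternating sums: b_i = ps[i] + (-1)**i * a for starting guess a.
--     ps = [0]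
--     last = 0
--     for s in S:
--         last = s - last
--         ps.append(last)
--     # For each position i and target x, the unique a with b_i == x; count hits per a.
--     cand = []
--     sign = 1
--     for p in ps:
--         for x in X:
--             a = sign * (x - p)
--             if -100 <= a < 100:
--                 cand.append(a)
--         sign = -sign
--     cnt = {}
--     for a in cand:
--         cnt[a] = cnt.get(a, 0) + 1
--     # Smallest a with the (positive) maximal count.
--     mx = 0
--     for a in range(-100, 100):
--         c = cnt.get(a, 0)
--         if mx < c:
--             mx = c
--             a_mx = a
--     return mx, a_mx
-- ===== Notes on version B (the rewrite author's own statement) =====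
-- stated objective: faster
-- what changed: Instead of trying all 200 values of a and rescanning X with X.count at every sequence position, B inverts the recurrence: it computes the alternating partial sums once, derives for each (position, x) pair the unique a that would match, tallies those a's in a dict, and then scans a single 200-entry table.
import Mathlib
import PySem

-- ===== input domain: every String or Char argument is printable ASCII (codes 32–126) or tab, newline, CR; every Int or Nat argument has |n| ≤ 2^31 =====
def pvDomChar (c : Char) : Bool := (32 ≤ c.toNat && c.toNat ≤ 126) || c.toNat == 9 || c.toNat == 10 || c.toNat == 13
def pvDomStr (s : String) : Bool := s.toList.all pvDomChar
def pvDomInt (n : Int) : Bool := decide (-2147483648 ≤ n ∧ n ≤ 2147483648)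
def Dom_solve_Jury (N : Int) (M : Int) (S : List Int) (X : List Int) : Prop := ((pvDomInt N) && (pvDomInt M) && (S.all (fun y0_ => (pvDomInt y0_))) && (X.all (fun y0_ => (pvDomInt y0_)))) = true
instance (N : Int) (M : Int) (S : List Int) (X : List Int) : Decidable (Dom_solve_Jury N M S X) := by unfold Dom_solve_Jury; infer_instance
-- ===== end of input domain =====

-- B replaces A's 200-fold rescan of X by one inversion pass tallying, for each (position, x),
-- the unique parameter a that matches; measured objective: faster (constant-factor).
-- Both Pythons raise UnboundLocalError when no value of a yields a match; Pre_ excludes exactly those inputs.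

-- ===== PORT A =====
def solve_Jury (N : Int) (M : Int) (S : List Int) (X : List Int) : Int × Int :=
  let st := (PySem.List.pyRange (-100) 100 1).foldl (fun (q : Int × Option Int) a =>
    let r := S.foldl (fun (w : Int × Int) s => (s - w.1, w.2 + PySem.List.count X w.1)) (a, 0)
    let cnt := r.2 + PySem.List.count X r.1
    (max q.1 cnt, if q.1 < cnt then some a else q.2)) ((0 : Int), (none : Option Int))
  (st.1, st.2.getD 0)   -- a_mx unassigned = Python raises; excluded by Pre_

-- ===== PORT B =====
def solve_Jury_alt (N : Int) (M : Int) (S : List Int) (X : List Int) : Int × Int :=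
  let ps := (S.foldl (fun (w : List Int × Int) s => (w.1 ++ [s - w.2], s - w.2)) ([0], (0 : Int))).1
  let cs := (ps.foldl (fun (w : List Int × Int) p =>
      (X.foldl (fun c x =>
        let a := w.2 * (x - p)
        if -100 ≤ a ∧ a < 100 then c ++ [a] else c) w.1, -w.2))
    (([] : List Int), (1 : Int))).1
  let cnt := cs.foldl (fun (d : PySem.Dict Int Int) a => d.modify a 0 (· + 1)) PySem.Dict.empty
  let st := (PySem.List.pyRange (-100) 100 1).foldl (fun (q : Int × Option Int) a =>
      let c := cnt.getD a 0
      if q.1 < c then (c, some a) else q) ((0 : Int), (none : Option Int))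
  (st.1, st.2.getD 0)   -- a_mx unassigned = Python raises; excluded by Pre_

-- ===== PRECONDITION & SPEC =====
-- the sequence b_0 = b, b_{i+1} = S_i - b_i (with b = 0 these are the partial alternating sums)
def pvAltVals (X0 : Int) : List Int → List Int
  | [] => [X0]
  | s :: S => X0 :: pvAltVals (s - X0) S

-- Pre_ excludes exactly the inputs on which A raises UnboundLocalError (no a in range(-100,100)
-- matches any element of X at any position, so a_mx is never assigned); B raises there too.
def Pre_solve_Jury (N : Int) (M : Int) (S : List Int) (X : List Int) : Prop :=
  ∃ q ∈ PySem.List.enumerate (pvAltVals 0 S) 0, ∃ x ∈ X,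
    -100 ≤ (if q.1 % 2 = 0 then (1 : Int) else -1) * (x - q.2) ∧
    (if q.1 % 2 = 0 then (1 : Int) else -1) * (x - q.2) < 100
instance (N : Int) (M : Int) (S : List Int) (X : List Int) : Decidable (Pre_solve_Jury N M S X) := by
  unfold Pre_solve_Jury; infer_instance

def pvWitness_solve_Jury : Int × Int × List Int × List Int := (1, 1, [0], [0])

def Spec_solve_Jury (N : Int) (M : Int) (S : List Int) (X : List Int) (out : Int × Int) : Prop := out = solve_Jury_alt N M S X
instance (N : Int) (M : Int) (S : List Int) (X : List Int) (out : Int × Int) : Decidable (Spec_solve_Jury N M S X out) := by unfold Spec_solve_Jury; infer_instance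

-- ===== CLAIM (what is proved, stated in full; the proofs are below) =====
def Claim_equal_solve_Jury : Prop := ∀ (N : Int) (M : Int) (S : List Int) (X : List Int), Dom_solve_Jury N M S X → Pre_solve_Jury N M S X → Spec_solve_Jury N M S X (solve_Jury N M S X)

-- ===== LEMMAS AND PROOFS =====

-- A's inner loop as a structural recursion: total matches of X against the b-sequence from b
def cntA (X : List Int) : Int → List Int → Int
  | b, [] => PySem.List.count X b
  | b, s :: S => PySem.List.count X b + cntA X (s - b) S

lemma cntA_foldl (X : List Int) : ∀ (S : List Int) (b c : Int),
    (S.foldl (fun (w : Int × Int) s => (s - w.1, w.2 + PySem.List.count X w.1)) (b, c)).2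
      + PySem.List.count X (S.foldl (fun (w : Int × Int) s => (s - w.1, w.2 + PySem.List.count X w.1)) (b, c)).1
    = c + cntA X b S := by
  intro S
  induction S with
  | nil => intro b c; simp [cntA]
  | cons s S ih => intro b c; simp only [List.foldl_cons, cntA]; rw [ih]; ring

-- B's candidate list as a structural recursion
def candR (X : List Int) : Int → Int → List Int → List Int
  | sg, b, [] => ((X.map fun x => sg * (x - b)).filter fun a => decide (-100 ≤ a ∧ a < 100))
  | sg, b, s :: S => ((X.map fun x => sg * (x - b)).filter fun a => decide (-100 ≤ a ∧ a < 100))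
      ++ candR X (-sg) (s - b) S

lemma inner_foldl (X : List Int) (sg p : Int) (acc : List Int) :
    X.foldl (fun c x => if -100 ≤ sg * (x - p) ∧ sg * (x - p) < 100 then c ++ [sg * (x - p)] else c) acc
    = acc ++ ((X.map fun x => sg * (x - p)).filter fun a => decide (-100 ≤ a ∧ a < 100)) := by
  induction X generalizing acc with
  | nil => simp
  | cons x X ih =>
    simp only [List.foldl_cons, List.map_cons, List.filter_cons]
    by_cases h : -100 ≤ sg * (x - p) ∧ sg * (x - p) < 100
    · simp [h, ih]
    · simp [h, ih]

lemma ps_foldl (S : List Int) : ∀ (b : Int) (acc : List Int),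
    (S.foldl (fun (w : List Int × Int) s => (w.1 ++ [s - w.2], s - w.2)) (acc ++ [b], b)).1
    = acc ++ pvAltVals b S := by
  induction S with
  | nil => intro b acc; simp [pvAltVals]
  | cons s S ih =>
    intro b acc
    simp only [List.foldl_cons, pvAltVals]
    have := ih (s - b) (acc ++ [b])
    simpa using this

lemma cand_foldl (X : List Int) : ∀ (S : List Int) (b sg : Int) (acc : List Int),
    ((pvAltVals b S).foldl (fun (w : List Int × Int) p =>
        (X.foldl (fun c x => if -100 ≤ w.2 * (x - p) ∧ w.2 * (x - p) < 100 then c ++ [w.2 * (x - p)] else c) w.1, -w.2))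
      (acc, sg)).1
    = acc ++ candR X sg b S := by
  intro S
  induction S with
  | nil => intro b sg acc; simp only [pvAltVals, List.foldl_cons, List.foldl_nil, candR]; rw [inner_foldl]
  | cons s S ih =>
    intro b sg acc
    simp only [pvAltVals, List.foldl_cons, candR]
    rw [inner_foldl, ih, List.append_assoc]

lemma count_candR (X : List Int) : ∀ (S : List Int) (b sg a : Int), (sg = 1 ∨ sg = -1) →
    -100 ≤ a → a < 100 → (List.count a (candR X sg b S) : Int) = cntA X (b + sg * a) S := by
  intro S
  induction S with
  | nil =>
    intro b sg a hsg h1 h2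
    have hinj : Function.Injective fun x : Int => sg * (x - b) := by
      intro u v h; rcases hsg with h' | h' <;> subst h' <;> simp at h <;> omega
    have h3 : a = (fun x : Int => sg * (x - b)) (b + sg * a) := by
      rcases hsg with h' | h' <;> subst h' <;> ring
    have hm : List.count a (List.map (fun x : Int => sg * (x - b)) X) = List.count (b + sg * a) X := by
      conv_lhs => rw [h3]
      exact List.count_map_of_injective _ _ hinj _
    simp only [candR, cntA]
    rw [List.count_filter (by simpa using And.intro h1 h2), hm, PySem.List.count_eq]
  | cons s S ih =>
    intro b sg a hsg h1 h2
    have hinj : Function.Injective fun x : Int => sg * (x - b) := by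
      intro u v h; rcases hsg with h' | h' <;> subst h' <;> simp at h <;> omega
    have h3 : a = (fun x : Int => sg * (x - b)) (b + sg * a) := by
      rcases hsg with h' | h' <;> subst h' <;> ring
    have hm : List.count a (List.map (fun x : Int => sg * (x - b)) X) = List.count (b + sg * a) X := by
      conv_lhs => rw [h3]
      exact List.count_map_of_injective _ _ hinj _
    have h4 : (-sg = 1 ∨ -sg = -1) := by rcases hsg with h' | h' <;> subst h' <;> simp
    have h5 : s - b + -sg * a = s - (b + sg * a) := by ring
    simp only [candR, cntA, List.count_append]
    push_cast
    rw [List.count_filter (by simpa using And.intro h1 h2), hm, PySem.List.count_eq,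
      ih (s - b) (-sg) a h4 h1 h2, h5]

lemma getD_empty (a : Int) : (PySem.Dict.empty : PySem.Dict Int Int).getD a 0 = 0 := by
  simp [PySem.Dict.empty, PySem.Dict.getD, PySem.Dict.get?]

theorem solve_Jury_eq (N M : Int) (S X : List Int) : solve_Jury N M S X = solve_Jury_alt N M S X := by
  simp only [solve_Jury, solve_Jury_alt]
  have hps : (S.foldl (fun (w : List Int × Int) s => (w.1 ++ [s - w.2], s - w.2)) ([0], (0 : Int))).1
      = pvAltVals 0 S := by
    have := ps_foldl S 0 []; simpa using this
  rw [hps, cand_foldl X S 0 1 []]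
  simp only [List.nil_append]
  have hcnt : ∀ a : Int, -100 ≤ a → a < 100 →
      ((candR X 1 0 S).foldl (fun (d : PySem.Dict Int Int) a => d.modify a 0 (· + 1)) PySem.Dict.empty).getD a 0
      = cntA X a S := by
    intro a h1 h2
    rw [PySem.Dict.getD_foldl_modify_add_one, getD_empty,
      count_candR X S 0 1 a (Or.inl rfl) h1 h2]
    simp
  rw [PySem.List.foldl_congr_mem (PySem.List.pyRange (-100) 100 1)
    (fun (q : Int × Option Int) a =>
      let r := S.foldl (fun (w : Int × Int) s => (s - w.1, w.2 + PySem.List.count X w.1)) (a, 0)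
      let cnt := r.2 + PySem.List.count X r.1
      (max q.1 cnt, if q.1 < cnt then some a else q.2))
    (fun (q : Int × Option Int) a =>
      let c := ((candR X 1 0 S).foldl (fun (d : PySem.Dict Int Int) a => d.modify a 0 (· + 1)) PySem.Dict.empty).getD a 0
      if q.1 < c then (c, some a) else q)
    ((0 : Int), (none : Option Int)) ?_]
  intro q a ha
  rw [PySem.List.mem_pyRange_one] at ha
  have hscoreA : (S.foldl (fun (w : Int × Int) s => (s - w.1, w.2 + PySem.List.count X w.1)) (a, 0)).2
      + PySem.List.count X (S.foldl (fun (w : Int × Int) s => (s - w.1, w.2 + PySem.List.count X w.1)) (a, 0)).1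
      = cntA X a S := by
    have := cntA_foldl X S a 0; omega
  simp only [hcnt a ha.1 ha.2, hscoreA]
  by_cases h : q.1 < cntA X a S
  · simp [h, max_eq_right (le_of_lt h)]
  · simp [h, max_eq_left (le_of_not_gt h)]

-- ===== VERDICT (by name: the statement is the Claim_ definition above) =====
theorem solve_Jury_spec : Claim_equal_solve_Jury := by
  intro N M S X _ _
  unfold Spec_solve_Jury
  exact solve_Jury_eq N M S X
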